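-- pv_equiv track=rewrite | github.com/RdrigoMachado/AI4PDEs-MultiGPU-MultiNode | topology/main.py | calculate_max_nlevel
-- ===== SOURCE A (Python) =====
-- def calculate_max_nlevel(local_nx, local_ny, local_nz):
--     level = 1
--     current_x, current_y, current_z = local_nx, local_ny, local_nz
--
--     while True:
--         if (current_x % 2 != 0) or (current_y % 2 != 0) or (current_z % 2 != 0):
--             break
--         if (current_x < 4) or (current_y < 4) or (current_z < 4):
--             break
--         current_x //= 2
--         current_y //= 2
--         current_z //= 2
--         level += 1
--     return level
-- ===== SOURCE B (Python) =====
-- def _halvings(d):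
--     k = 0
--     while d % 2 == 0 and d >= 4:
--         d //= 2
--         k += 1
--     return k
--
-- def calculate_max_nlevel(local_nx, local_ny, local_nz):
--     return 1 + min(_halvings(local_nx), _halvings(local_ny), _halvings(local_nz))
-- ===== Notes on version B (the rewrite author's own statement) =====
-- stated objective: simpler
-- what changed: Replaces the lockstep three-dimension halving loop with an independent per-dimension halving count combined by 1 + min.
import Mathlib
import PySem

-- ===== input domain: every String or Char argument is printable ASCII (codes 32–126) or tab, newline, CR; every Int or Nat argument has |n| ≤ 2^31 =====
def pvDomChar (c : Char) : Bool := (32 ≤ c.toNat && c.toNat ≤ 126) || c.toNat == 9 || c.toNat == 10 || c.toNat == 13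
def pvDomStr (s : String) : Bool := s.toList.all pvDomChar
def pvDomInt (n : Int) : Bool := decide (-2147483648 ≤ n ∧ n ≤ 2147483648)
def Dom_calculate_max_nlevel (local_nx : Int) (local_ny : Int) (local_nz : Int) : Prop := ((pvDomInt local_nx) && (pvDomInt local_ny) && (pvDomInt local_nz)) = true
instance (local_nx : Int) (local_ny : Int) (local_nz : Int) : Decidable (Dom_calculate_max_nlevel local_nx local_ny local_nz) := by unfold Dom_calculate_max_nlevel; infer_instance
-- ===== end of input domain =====

-- B replaces A's lockstep three-dimension halving loop with independent per-dimension halving counts combined by 1 + min (simpler decomposition, same cost).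

-- ===== PORT A =====
-- loop body of A's 'while True': state (current_x, current_y, current_z, level)
def pvLoopA (x y z level : Int) : Int :=
  if PySem.Int.mod x 2 ≠ 0 ∨ PySem.Int.mod y 2 ≠ 0 ∨ PySem.Int.mod z 2 ≠ 0 then level
  else if x < 4 ∨ y < 4 ∨ z < 4 then level
  else pvLoopA (PySem.Int.floordiv x 2) (PySem.Int.floordiv y 2) (PySem.Int.floordiv z 2) (level + 1)
termination_by x.toNat
decreasing_by
  have : PySem.Int.floordiv x 2 = x / 2 := PySem.Int.floordiv_eq_ediv_of_pos (by omega)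
  rw [this]; omega

def calculate_max_nlevel (local_nx : Int) (local_ny : Int) (local_nz : Int) : Int :=
  pvLoopA local_nx local_ny local_nz 1

-- ===== PORT B =====
-- B's helper _halvings: count how often d can be halved while even and >= 4
def pvHalvings (d : Int) : Int :=
  if PySem.Int.mod d 2 = 0 ∧ 4 ≤ d then pvHalvings (PySem.Int.floordiv d 2) + 1 else 0
termination_by d.toNat
decreasing_by
  have : PySem.Int.floordiv d 2 = d / 2 := PySem.Int.floordiv_eq_ediv_of_pos (by omega)
  rw [this]; omega

def calculate_max_nlevel_alt (local_nx : Int) (local_ny : Int) (local_nz : Int) : Int :=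
  1 + min (min (pvHalvings local_nx) (pvHalvings local_ny)) (pvHalvings local_nz)

-- ===== PRECONDITION & SPEC =====
def Spec_calculate_max_nlevel (local_nx : Int) (local_ny : Int) (local_nz : Int) (out : Int) : Prop := out = calculate_max_nlevel_alt local_nx local_ny local_nz
instance (local_nx : Int) (local_ny : Int) (local_nz : Int) (out : Int) : Decidable (Spec_calculate_max_nlevel local_nx local_ny local_nz out) := by unfold Spec_calculate_max_nlevel; infer_instance

-- ===== CLAIM (what is proved, stated in full; the proofs are below) =====
def Claim_equal_calculate_max_nlevel : Prop := ∀ (local_nx : Int) (local_ny : Int) (local_nz : Int), Dom_calculate_max_nlevel local_nx local_ny local_nz → Spec_calculate_max_nlevel local_nx local_ny local_nz (calculate_max_nlevel local_nx local_ny local_nz)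

-- ===== LEMMAS AND PROOFS =====
lemma pvHalvings_nonneg (d : Int) : 0 ≤ pvHalvings d := by
  unfold pvHalvings
  split
  · have := pvHalvings_nonneg (PySem.Int.floordiv d 2); omega
  · omega
termination_by d.toNat
decreasing_by
  have : PySem.Int.floordiv d 2 = d / 2 := PySem.Int.floordiv_eq_ediv_of_pos (by omega)
  rw [this]; omega

lemma pvHalvings_zero (d : Int) (h : ¬(PySem.Int.mod d 2 = 0 ∧ 4 ≤ d)) : pvHalvings d = 0 := by
  rw [pvHalvings, if_neg h]

lemma pvHalvings_step (d : Int) (h : PySem.Int.mod d 2 = 0 ∧ 4 ≤ d) :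
    pvHalvings d = pvHalvings (PySem.Int.floordiv d 2) + 1 := by
  rw [pvHalvings, if_pos h]

lemma pvLoopA_eq (x y z level : Int) :
    pvLoopA x y z level = level + min (min (pvHalvings x) (pvHalvings y)) (pvHalvings z) := by
  rw [pvLoopA]
  have nx := pvHalvings_nonneg x
  have ny := pvHalvings_nonneg y
  have nz := pvHalvings_nonneg z
  split
  · rename_i h
    rcases h with h | h | h
    · rw [pvHalvings_zero x (fun hc => h hc.1)]; omega
    · rw [pvHalvings_zero y (fun hc => h hc.1)]; omega
    · rw [pvHalvings_zero z (fun hc => h hc.1)]; omega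
  · split
    · rename_i hlt
      rcases hlt with h | h | h
      · rw [pvHalvings_zero x (fun hc => by omega)]; omega
      · rw [pvHalvings_zero y (fun hc => by omega)]; omega
      · rw [pvHalvings_zero z (fun hc => by omega)]; omega
    · rename_i hmod hlt
      simp only [not_or, ne_eq, not_not, not_lt] at hmod hlt
      rw [pvLoopA_eq, pvHalvings_step x ⟨hmod.1, hlt.1⟩,
          pvHalvings_step y ⟨hmod.2.1, hlt.2.1⟩, pvHalvings_step z ⟨hmod.2.2, hlt.2.2⟩]
      omega
termination_by x.toNat
decreasing_by
  have : PySem.Int.floordiv x 2 = x / 2 := PySem.Int.floordiv_eq_ediv_of_pos (by omega)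
  rw [this]; omega

-- ===== VERDICT (by name: the statement is the Claim_ definition above) =====
theorem calculate_max_nlevel_spec : Claim_equal_calculate_max_nlevel := by
  intro x y z _
  unfold Spec_calculate_max_nlevel calculate_max_nlevel calculate_max_nlevel_alt
  rw [pvLoopA_eq]
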